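-- pv_equiv track=rewrite | github.com/cake-lab/RevDecode | revdecode/update_ranking_scheme.py | transform_ranking
-- ===== SOURCE A (Python) =====
-- def transform_ranking(intermediate_ranking):
--     """
--     Transforms the intermediate ranking to the new ranking format.
--
--     Args:
--     - intermediate_ranking: List[List[int]]. The intermediate format of ranks.
--
--     Returns:
--     - List[List[int]]. The transformed ranks in intermediate format.
--     """
--     new_ranking = []
--     prev_rank = 0
--     for sublist in intermediate_ranking:
--         new_rank = prev_rank + 1
--         new_ranking.append([new_rank] * len(sublist))
--         prev_rank = new_rank + len(sublist) - 1
--     return new_ranking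
-- ===== SOURCE B (Python) =====
-- def transform_ranking(intermediate_ranking):
--     lengths = [len(s) for s in intermediate_ranking]
--     offsets = [sum(lengths[:i]) for i in range(len(lengths))]
--     return [[o + 1] * l for o, l in zip(offsets, lengths)]
-- ===== Notes on version B (the rewrite author's own statement) =====
-- stated objective: alternative
-- what changed: B replaces the single loop threading a running prev_rank through mutable state with a three-stage pipeline: extract group lengths, build an offset table of prefix sums, then map each (offset, length) pair to its constant rank block.
import Mathlib
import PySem

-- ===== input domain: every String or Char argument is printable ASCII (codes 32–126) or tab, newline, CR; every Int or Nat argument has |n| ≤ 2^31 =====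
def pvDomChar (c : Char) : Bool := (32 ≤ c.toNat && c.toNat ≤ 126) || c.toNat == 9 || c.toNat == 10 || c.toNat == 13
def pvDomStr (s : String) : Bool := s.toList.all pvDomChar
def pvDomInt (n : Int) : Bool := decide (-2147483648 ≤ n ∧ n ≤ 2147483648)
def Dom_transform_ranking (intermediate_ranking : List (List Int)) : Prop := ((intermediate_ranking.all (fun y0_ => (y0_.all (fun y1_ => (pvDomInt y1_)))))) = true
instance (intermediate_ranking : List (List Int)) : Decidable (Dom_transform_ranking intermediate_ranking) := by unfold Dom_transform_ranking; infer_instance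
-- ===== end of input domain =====

-- B rebuilds the output from a prefix-sum offset table instead of A's running prev_rank loop; alternative decomposition, same results.

-- ===== PORT A =====
def transform_ranking (intermediate_ranking : List (List Int)) : List (List Int) :=
  (intermediate_ranking.foldl
    (fun (st : List (List Int) × Int) sublist =>
      let new_rank := st.2 + 1
      (st.1 ++ [List.replicate sublist.length new_rank], new_rank + (sublist.length : Int) - 1))
    ([], 0)).1

-- ===== PORT B =====
def transform_ranking_alt (intermediate_ranking : List (List Int)) : List (List Int) :=
  let lengths := intermediate_ranking.map (fun s => s.length)
  let offsets := (List.range lengths.length).map (fun i => (lengths.take i).sum)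
  (offsets.zip lengths).map (fun p => List.replicate p.2 ((p.1 : Int) + 1))

-- ===== PRECONDITION & SPEC =====
def Spec_transform_ranking (intermediate_ranking : List (List Int)) (out : List (List Int)) : Prop := out = transform_ranking_alt intermediate_ranking
instance (intermediate_ranking : List (List Int)) (out : List (List Int)) : Decidable (Spec_transform_ranking intermediate_ranking out) := by unfold Spec_transform_ranking; infer_instance

-- ===== CLAIM (what is proved, stated in full; the proofs are below) =====
def Claim_equal_transform_ranking : Prop := ∀ (intermediate_ranking : List (List Int)), Dom_transform_ranking intermediate_ranking → Spec_transform_ranking intermediate_ranking (transform_ranking intermediate_ranking)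

-- ===== LEMMAS AND PROOFS =====

-- B's pipeline with the offset table shifted by a constant c
def pvShiftB (c : Nat) (ir : List (List Int)) : List (List Int) :=
  (((List.range (ir.map (fun s => s.length)).length).map
      (fun i => c + ((ir.map (fun s => s.length)).take i).sum)).zip
    (ir.map (fun s => s.length))).map
    (fun p => List.replicate p.2 ((p.1 : Int) + 1))

theorem pvShiftB_cons (c : Nat) (s : List Int) (t : List (List Int)) :
    pvShiftB c (s :: t) = List.replicate s.length ((c : Int) + 1) :: pvShiftB (c + s.length) t := by
  simp [pvShiftB, List.range_succ_eq_map, List.map_map]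
  congr 2
  refine List.map_congr_left fun i _ => ?_
  simp [Function.comp, List.take_succ_cons]
  omega

theorem pvFoldA (ir : List (List Int)) :
    ∀ (acc : List (List Int)) (c : Nat),
    (ir.foldl
      (fun (st : List (List Int) × Int) sublist =>
        let new_rank := st.2 + 1
        (st.1 ++ [List.replicate sublist.length new_rank], new_rank + (sublist.length : Int) - 1))
      (acc, (c : Int))).1 = acc ++ pvShiftB c ir := by
  induction ir with
  | nil => intro acc c; simp [pvShiftB]
  | cons s t ih =>
    intro acc c
    have hc : (c : Int) + 1 + (s.length : Int) - 1 = ((c + s.length : Nat) : Int) := by push_cast; ring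
    simp only [List.foldl_cons]
    rw [show ((c : Int) + 1 + (s.length : Int) - 1) = ((c + s.length : Nat) : Int) from hc]
    rw [ih (acc ++ [List.replicate s.length ((c : Int) + 1)]) (c + s.length)]
    rw [pvShiftB_cons]
    simp

theorem pvAltEqShift (ir : List (List Int)) : transform_ranking_alt ir = pvShiftB 0 ir := by
  simp [transform_ranking_alt, pvShiftB]

-- ===== VERDICT (by name: the statement is the Claim_ definition above) =====
theorem transform_ranking_spec : Claim_equal_transform_ranking := by
  intro ir _
  show transform_ranking ir = transform_ranking_alt ir
  rw [pvAltEqShift]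
  have := pvFoldA ir [] 0
  simpa [transform_ranking] using this
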